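-- pv_equiv track=rewrite | github.com/Performant-Labs/sentence-maker | sentence_generator.py | _collect_word_ngrams
-- ===== SOURCE A (Python) =====
-- from typing import List, Optional, Tuple
-- from collections import Counter, defaultdict, deque
--
-- def _collect_word_ngrams(normalized_sentence: str) -> Tuple[Counter, int]:
--     """Return Counter of word 1-2 grams and their total count."""
--     tokens = normalized_sentence.split()
--     grams: List[str] = []
--     for size in (1, 2):
--         if len(tokens) < size:
--             continue
--         for idx in range(len(tokens) - size + 1):
--             grams.append(' '.join(tokens[idx:idx + size]))
--     counter = Counter(grams)
--     return counter, len(grams)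
-- ===== SOURCE B (Python) =====
-- from collections import Counter
--
-- def _collect_word_ngrams(normalized_sentence):
--     """Single pass over the tokens, counting unigrams and bigrams incrementally."""
--     tokens = normalized_sentence.split()
--     uni = Counter()
--     bi = Counter()
--     prev = None
--     total = 0
--     for tok in tokens:
--         uni[tok] += 1
--         total += 1
--         if prev is not None:
--             bi[' '.join((prev, tok))] += 1
--             total += 1
--         prev = tok
--     return uni + bi, total
-- ===== Notes on version B (the rewrite author's own statement) =====
-- stated objective: alternative
-- what changed: Replaces the size-keyed double pass that materialises a grams list and counts it afterwards with a single position-keyed pass that maintains two Counters and a running total incrementally, combining them at the end with Counter addition.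
import Mathlib
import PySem

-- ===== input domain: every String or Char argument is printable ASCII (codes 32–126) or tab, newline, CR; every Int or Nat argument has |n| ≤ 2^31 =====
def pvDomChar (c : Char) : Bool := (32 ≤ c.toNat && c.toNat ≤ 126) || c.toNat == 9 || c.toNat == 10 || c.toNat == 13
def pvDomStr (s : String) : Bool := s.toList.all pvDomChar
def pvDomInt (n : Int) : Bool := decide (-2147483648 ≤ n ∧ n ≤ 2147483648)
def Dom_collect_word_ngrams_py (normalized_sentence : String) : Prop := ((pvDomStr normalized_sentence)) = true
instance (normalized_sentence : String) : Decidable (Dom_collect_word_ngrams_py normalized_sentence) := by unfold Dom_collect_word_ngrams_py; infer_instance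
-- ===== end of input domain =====

-- B replaces A's two size-keyed passes (build a grams list, then count it) by one
-- position-keyed pass maintaining unigram/bigram Counters and a running total (objective: alternative).


-- ===== PORT A =====
def collect_word_ngrams_py (normalized_sentence : String) : (List (String × Int)) × Int :=
  let tokens := PySem.Str.split₀ normalized_sentence
  let grams : List String := [(1 : Int), 2].foldl (fun grams size =>
    if (tokens.length : Int) < size then grams
    else (PySem.List.pyRange 0 ((tokens.length : Int) - size + 1) 1).foldl
      (fun g idx => g ++ [PySem.Str.join " " (PySem.List.slice tokens (some idx) (some (idx + size)))]) grams) []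
  ((PySem.Dict.counter grams).items, (grams.length : Int))

-- ===== PORT B =====
-- loop body of Source B's single pass: state = (uni, bi, prev, total)
def pvAltStep (st : PySem.Dict String Int × PySem.Dict String Int × Option String × Int)
    (tok : String) : PySem.Dict String Int × PySem.Dict String Int × Option String × Int :=
  let uni := st.1.modify tok 0 (· + 1)
  let total := st.2.2.2 + 1
  match st.2.2.1 with
  | some p => (uni, st.2.1.modify (PySem.Str.join " " [p, tok]) 0 (· + 1), some tok, total + 1)
  | none => (uni, st.2.1, some tok, total)

def collect_word_ngrams_py_alt (normalized_sentence : String) : (List (String × Int)) × Int :=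
  let tokens := PySem.Str.split₀ normalized_sentence
  let st := tokens.foldl pvAltStep (PySem.Dict.empty, PySem.Dict.empty, none, 0)
  -- 'uni + bi' (Counter addition; all counts positive): fold bi's items into uni
  let combined := st.2.1.items.foldl (fun (d : PySem.Dict String Int) p => d.modify p.1 0 (· + p.2)) st.1
  (combined.items, st.2.2.2)

-- ===== PRECONDITION & SPEC =====
def Spec_collect_word_ngrams_py (normalized_sentence : String) (out : (List (String × Int)) × Int) : Prop := out = collect_word_ngrams_py_alt normalized_sentence
instance (normalized_sentence : String) (out : (List (String × Int)) × Int) : Decidable (Spec_collect_word_ngrams_py normalized_sentence out) := by unfold Spec_collect_word_ngrams_py; infer_instance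

-- ===== CLAIM (what is proved, stated in full; the proofs are below) =====
def Claim_equal_collect_word_ngrams_py : Prop := ∀ (normalized_sentence : String), Dom_collect_word_ngrams_py normalized_sentence → Spec_collect_word_ngrams_py normalized_sentence (collect_word_ngrams_py normalized_sentence)

-- ===== LEMMAS AND PROOFS =====

-- the bigrams of p :: ts, as B produces them
def pvBigramsFrom (p : String) : List String → List String
  | [] => []
  | x :: r => PySem.Str.join " " [p, x] :: pvBigramsFrom x r

def pvBigrams : List String → List String
  | [] => []
  | x :: r => pvBigramsFrom x r

theorem pv_join_singleton (x : String) : PySem.Str.join " " [x] = x := by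
  have h : (PySem.Str.join " " [x]).toList = x.toList := by
    simp [PySem.Str.toList_join, PySem.Chars.join_singleton]
  exact String.toList_injective h

theorem pv_unis_eq : ∀ ts : List String,
    (List.range ts.length).map (fun i => PySem.Str.join " " (List.take 1 (List.drop i ts))) = ts := by
  intro ts
  induction ts with
  | nil => simp
  | cons x r ih =>
    simp only [List.length_cons, List.range_succ_eq_map, List.map_cons, List.map_map]
    rw [List.cons_eq_cons]
    refine ⟨by simp [pv_join_singleton], by simpa [Function.comp] using ih⟩

theorem pv_bis_eq : ∀ ts : List String,
    (List.range (ts.length - 1)).map (fun i => PySem.Str.join " " (List.take 2 (List.drop i ts))) = pvBigrams ts := by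
  intro ts
  induction ts with
  | nil => simp [pvBigrams]
  | cons x r ih =>
    cases r with
    | nil => simp [pvBigrams, pvBigramsFrom]
    | cons y r' =>
      simp only [List.length_cons, Nat.add_sub_cancel, List.range_succ_eq_map, List.map_cons,
        List.map_map, pvBigrams, pvBigramsFrom]
      rw [List.cons_eq_cons]
      refine ⟨by simp, ?_⟩
      have := ih
      simp only [List.length_cons, Nat.add_sub_cancel, pvBigrams] at this
      simpa [Function.comp] using this

-- B's loop, characterised
theorem pv_loopB : ∀ (ts : List String) (p : String) (uni bi : PySem.Dict String Int) (total : Int),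
    ts.foldl pvAltStep (uni, bi, some p, total)
    = (ts.foldl (fun d x => d.modify x 0 (· + 1)) uni,
       (pvBigramsFrom p ts).foldl (fun d x => d.modify x 0 (· + 1)) bi,
       some (ts.getLastD p),
       total + (ts.length : Int) + ((pvBigramsFrom p ts).length : Int)) := by
  intro ts
  induction ts with
  | nil => intro p uni bi total; simp [pvBigramsFrom]
  | cons x r ih =>
    intro p uni bi total
    simp only [List.foldl_cons, pvAltStep, pvBigramsFrom, List.getLastD_cons]
    rw [ih]
    refine Prod.ext rfl (Prod.ext rfl (Prod.ext rfl ?_))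
    simp only [List.length_cons]
    push_cast
    ring

theorem pv_merge_getD : ∀ (l : List (String × Int)) (d : PySem.Dict String Int) (k : String),
    (l.foldl (fun d p => d.modify p.1 0 (· + p.2)) d).getD k 0
    = d.getD k 0 + ((l.filter (fun p => p.1 == k)).map (·.2)).sum := by
  intro l
  induction l with
  | nil => intro d k; simp
  | cons q r ih =>
    intro d k
    simp only [List.foldl_cons, List.filter_cons]
    by_cases h : q.1 = k
    · rw [ih]
      simp [h]
      ring
    · rw [ih]
      simp [PySem.Dict.getD_modify, h, Ne.symm h]

theorem pv_filter_nodup : ∀ (l : List String) (k : String), l.Nodup →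
    l.filter (fun x => x == k) = if k ∈ l then [k] else [] := by
  intro l
  induction l with
  | nil => intro k _; simp
  | cons x r ih =>
    intro k hnd
    simp only [List.nodup_cons] at hnd
    by_cases h : x = k
    · subst h
      have hf : List.filter (fun y => y == x) r = [] :=
        List.filter_eq_nil_iff.mpr (fun a ha => by
          simp only [beq_iff_eq]
          intro he; exact hnd.1 (he ▸ ha))
      simp [hf]
    · simp [h, ih k hnd.2, Ne.symm h]

theorem pv_update_ofList {s : PySem.Set String} (xs : List String) :
    PySem.Set.update s (PySem.Set.ofList xs) = PySem.Set.update s xs := by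
  rw [PySem.Set.update_eq_append_filter, PySem.Set.update_eq_append_filter, PySem.Set.ofList_ofList]

-- folding Counter(bs)'s items into d with '+=' = folding bs itself
theorem pv_counter_merge (bs : List String) (d : PySem.Dict String Int) (hnd : d.keys.Nodup) :
    (PySem.Dict.counter bs).items.foldl (fun d p => d.modify p.1 0 (· + p.2)) d
    = bs.foldl (fun d x => d.modify x 0 (· + 1)) d := by
  apply PySem.Dict.ext
  have hndL : ((PySem.Dict.counter bs).items.foldl (fun d p => d.modify p.1 0 (· + p.2)) d).keys.Nodup :=
    PySem.Dict.nodup_keys_foldl_modify_key _ (fun p : String × Int => p.1) 0 (fun _ (p : String × Int) => (· + p.2)) d hnd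
  have hndR : (bs.foldl (fun d x => d.modify x 0 (· + 1)) d).keys.Nodup :=
    PySem.Dict.nodup_keys_foldl_modify_key _ (fun x : String => x) 0 (fun _ _ => (· + 1)) d hnd
  rw [PySem.Dict.items_eq_map_keys _ hndL 0, PySem.Dict.items_eq_map_keys _ hndR 0]
  have hkeys : ((PySem.Dict.counter bs).items.foldl (fun d p => d.modify p.1 0 (· + p.2)) d).keys
      = (bs.foldl (fun d x => d.modify x 0 (· + 1)) d).keys := by
    rw [PySem.Dict.keys_foldl_modify_key _ (fun p : String × Int => p.1) 0 (fun _ (p : String × Int) => (· + p.2)) d,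
        PySem.Dict.keys_foldl_modify _ 0 (fun _ _ => (· + 1)) d]
    have : (PySem.Dict.counter bs).items.map (fun p => p.1) = PySem.Set.ofList bs := by
      rw [PySem.Dict.items_counter]
      simp [Function.comp_def]
    rw [this, pv_update_ofList]
  rw [hkeys]
  apply List.map_congr_left
  intro k _
  have hget : ((PySem.Dict.counter bs).items.foldl (fun d p => d.modify p.1 0 (· + p.2)) d).getD k 0
      = (bs.foldl (fun d x => d.modify x 0 (· + 1)) d).getD k 0 := by
    rw [pv_merge_getD, PySem.Dict.getD_foldl_modify_add_one]
    congr 1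
    rw [PySem.Dict.items_counter, List.filter_map]
    have : (fun p => p.1 == k) ∘ (fun k' => ((k' : String), (bs.count k' : Int))) = fun x => x == k := by
      funext x; simp
    rw [this, pv_filter_nodup _ k (PySem.Set.nodup_ofList bs)]
    by_cases hk : k ∈ PySem.Set.ofList bs
    · simp [hk]
    · have : k ∉ bs := fun h => hk ((PySem.Set.mem_ofList _ _).mpr h)
      simp [hk, List.count_eq_zero_of_not_mem this]
  rw [hget]

-- A's grams list is the unigrams followed by the bigrams
theorem pv_gramsA (ts : List String) :
    ([(1 : Int), 2].foldl (fun grams size =>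
      if (ts.length : Int) < size then grams
      else (PySem.List.pyRange 0 ((ts.length : Int) - size + 1) 1).foldl
        (fun g idx => g ++ [PySem.Str.join " " (PySem.List.slice ts (some idx) (some (idx + size)))]) grams) [])
    = ts ++ pvBigrams ts := by
  simp only [List.foldl_cons, List.foldl_nil]
  by_cases h0 : ts = []
  · subst h0; norm_num [pvBigrams]
  have h1 : ¬ ((ts.length : Int) < 1) := by
    have : 0 < ts.length := List.length_pos_iff.mpr h0
    omega
  rw [if_neg h1]
  have e1 : (ts.length : Int) - 1 + 1 = (ts.length : Int) := by ring
  rw [e1, PySem.List.pyRange_zero_natCast, List.foldl_map,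
      PySem.List.foldl_append_singleton_eq_map, List.nil_append]
  have hu : (List.range ts.length).map
      (fun k : Nat => PySem.Str.join " " (PySem.List.slice ts (some (k : Int)) (some ((k : Int) + 1)))) = ts := by
    have : ∀ k : Nat, PySem.List.slice ts (some (k : Int)) (some ((k : Int) + 1))
        = List.take 1 (List.drop k ts) := by
      intro k
      have : ((k : Int) + 1) = ((k + 1 : Nat) : Int) := by push_cast; ring
      rw [this, PySem.List.slice_natCast]
      simp
    simp only [this]
    exact pv_unis_eq ts
  rw [hu]
  by_cases h2 : (ts.length : Int) < 2
  · rw [if_pos h2]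
    have : ts.length ≤ 1 := by omega
    cases ts with
    | nil => simp [pvBigrams]
    | cons x r =>
      have : r = [] := by
        simp only [List.length_cons] at this
        exact List.eq_nil_of_length_eq_zero (by omega)
      subst this
      simp [pvBigrams, pvBigramsFrom]
  · rw [if_neg h2]
    have hlen : 2 ≤ ts.length := by omega
    have e2 : (ts.length : Int) - 2 + 1 = ((ts.length - 1 : Nat) : Int) := by
      have := Nat.cast_sub (by omega : 1 ≤ ts.length) (R := Int)
      omega
    rw [e2, PySem.List.pyRange_zero_natCast, List.foldl_map,
        PySem.List.foldl_append_singleton_eq_map]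
    congr 1
    have hb : ∀ k : Nat, PySem.List.slice ts (some (k : Int)) (some ((k : Int) + 2))
        = List.take 2 (List.drop k ts) := by
      intro k
      have : ((k : Int) + 2) = ((k + 2 : Nat) : Int) := by push_cast; ring
      rw [this, PySem.List.slice_natCast]
      simp
    simp only [hb]
    exact pv_bis_eq ts

-- ===== VERDICT (by name: the statement is the Claim_ definition above) =====
theorem collect_word_ngrams_py_spec : Claim_equal_collect_word_ngrams_py := by
  intro s _
  unfold Spec_collect_word_ngrams_py collect_word_ngrams_py collect_word_ngrams_py_alt
  simp only []
  rw [pv_gramsA (PySem.Str.split₀ s)]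
  cases hts : PySem.Str.split₀ s with
  | nil =>
    simp only [List.foldl_nil, List.nil_append, pvBigrams]
    rfl
  | cons x r =>
    simp only [List.foldl_cons, pvAltStep]
    rw [pv_loopB r x (PySem.Dict.empty.modify x 0 (· + 1)) PySem.Dict.empty (0 + 1)]
    have hbi : (pvBigramsFrom x r).foldl (fun d y => d.modify y 0 (· + 1)) PySem.Dict.empty
        = PySem.Dict.counter (pvBigramsFrom x r) := (PySem.Dict.counter_eq_foldl _).symm
    have huni : r.foldl (fun d y => d.modify y 0 (· + 1)) (PySem.Dict.empty.modify x 0 (· + 1))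
        = PySem.Dict.counter (x :: r) := by
      rw [PySem.Dict.counter_eq_foldl]
      simp
    simp only [hbi, huni]
    rw [pv_counter_merge _ _ (PySem.Dict.nodup_keys_counter (x :: r))]
    have hc : PySem.Dict.counter (x :: r ++ pvBigramsFrom x r)
        = List.foldl (fun d y => d.modify y 0 (· + 1)) (PySem.Dict.counter (x :: r)) (pvBigramsFrom x r) := by
      rw [PySem.Dict.counter_eq_foldl, List.foldl_append, ← PySem.Dict.counter_eq_foldl]
    simp only [pvBigrams]
    rw [hc]
    refine Prod.ext rfl ?_
    simp only [List.length_append, List.length_cons]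
    push_cast
    ring
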